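-- pv_equiv track=rewrite | github.com/joyceycodes/CodeWars | Python/6kyu/fold_an_array.py | fold_array
-- ===== SOURCE A (Python) =====
-- def fold_array(array, runs):
--     nums = [*array]
--     while runs > 0:
--         result = []
--         middle = len(nums) // 2
--         left = 0
--         right = len(nums) - 1
--         while left < right:
--             result.append(nums[left]+nums[right])
--             left += 1
--             right -= 1
--         if len(nums) % 2 == 1:
--             result.append(nums[middle])
--         nums = result
--         runs -= 1
--     return result
-- ===== SOURCE B (Python) =====
-- def fold_array(array, runs):
--     # Scatter-add: compute each element's final bucket index directly (the fold
--     # sends index i of a length-L list to min(i, L-1-i)), with the number of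
--     # folds capped at max(1, (n-1).bit_length()) since length <= 1 is a fixed
--     # point; one pass over the input, no intermediate lists.
--     n = len(array)
--     k = min(runs, max(1, (n - 1).bit_length()))
--     lens = []
--     m = n
--     for _ in range(k):
--         lens.append(m)
--         m = (m + 1) // 2
--     out = [0] * m
--     for i, v in enumerate(array):
--         j = i
--         for L in lens:
--             j = min(j, L - 1 - j)
--         out[j] += v
--     return out
-- ===== Notes on version B (the rewrite author's own statement) =====
-- stated objective: alternative
-- what changed: B never builds the intermediate folded lists: it computes, for each input element, its final bucket index directly by iterating the index map i -> min(i, L-1-i) over the (capped at max(1,(n-1).bit_length()), since length <= 1 is a fixed point) sequence of lengths, and scatter-adds each element into a zero-initialised output buffer in one pass.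
-- crash fix: On runs <= 0 A raises UnboundLocalError (result is never assigned before being returned); B performs zero folds and returns the array unchanged. — e.g. on fold_array([3, 7], 0): A raises UnboundLocalError, B returns [3, 7]
import Mathlib
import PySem

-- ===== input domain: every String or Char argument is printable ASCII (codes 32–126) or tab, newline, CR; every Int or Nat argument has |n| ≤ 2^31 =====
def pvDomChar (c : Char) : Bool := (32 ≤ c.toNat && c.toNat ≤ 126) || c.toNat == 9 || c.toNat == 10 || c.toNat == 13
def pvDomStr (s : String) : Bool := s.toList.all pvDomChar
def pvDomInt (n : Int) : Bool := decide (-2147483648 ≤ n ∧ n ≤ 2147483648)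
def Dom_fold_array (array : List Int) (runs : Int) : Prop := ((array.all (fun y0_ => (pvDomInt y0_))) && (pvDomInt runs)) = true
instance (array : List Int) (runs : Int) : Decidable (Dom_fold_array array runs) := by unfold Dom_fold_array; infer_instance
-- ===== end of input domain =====

-- B never builds the intermediate folded lists: it computes each element's final
-- bucket index directly (one fold sends index i of a length-L list to
-- min(i, L-1-i)) over the sequence of lengths, capped at max(1,(n-1).bit_length())
-- since a list of length ≤ 1 is a fixed point, and scatter-adds the elements
-- into a zero buffer in a single pass.

-- ===== PORT A =====
-- inner `while left < right` loop: appends nums[left]+nums[right], moves both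
-- pointers; the fuel (≥ the iteration count, a pure totality guard) is never exhausted
def pvAInner (nums : List Int) : Nat → List Int → Int → Int → List Int
  | 0, res, _, _ => res
  | f + 1, res, left, right =>
    if left < right then
      pvAInner nums f (res ++ [PySem.List.pyGetD nums left 0 + PySem.List.pyGetD nums right 0])
        (left + 1) (right - 1)
    else res

-- body of one outer iteration; len(nums)//2 and len(nums)%2 are exact as Nat
-- division/mod since the length is nonnegative
def pvABody (nums : List Int) : List Int :=
  let middle : Nat := nums.length / 2
  let r1 := pvAInner nums nums.length [] 0 ((nums.length : Int) - 1)
  if nums.length % 2 == 1 then r1 ++ [PySem.List.pyGetD nums (middle : Int) 0] else r1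

-- outer `while runs > 0` loop, fuel = runs.toNat (exact: runs drops by 1 per pass);
-- `result` starts unbound: the fuel-out/never-entered [] branch is Python's
-- UnboundLocalError, excluded by Pre_
def pvALoop : Nat → List Int → Int → List Int
  | 0, _, _ => []
  | f + 1, nums, runs =>
    if 0 < runs then
      let result := pvABody nums
      if 0 < runs - 1 then pvALoop f result (runs - 1) else result
    else []

def fold_array (array : List Int) (runs : Int) : List Int :=
  pvALoop runs.toNat array runs

-- ===== PORT B =====
-- the `for _ in range(k)` loop building `lens` (the lengths before each fold)
-- and the final length m; (m+1)//2 is PySem.Int.floordiv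
def pvBLens : Nat → Int → List Int × Int
  | 0, m => ([], m)
  | k + 1, m =>
    let r := pvBLens k (PySem.Int.floordiv (m + 1) 2)
    (m :: r.1, r.2)

def fold_array_alt (array : List Int) (runs : Int) : List Int :=
  let n : Int := array.length
  let k : Int := min runs (max 1 (PySem.Int.bitLength (n - 1) : Int))
  let lm := pvBLens k.toNat n
  let out0 := List.replicate lm.2.toNat (0 : Int)
  (PySem.List.enumerate array 0).foldl
    (fun out p =>
      let j := lm.1.foldl (fun j L => min j (L - 1 - j)) p.1
      PySem.List.pySetD out j (PySem.List.pyGetD out j 0 + p.2)) out0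

-- ===== PRECONDITION & SPEC =====
-- Pre_ excludes runs ≤ 0, where A raises UnboundLocalError (`result` is never assigned).
def Pre_fold_array (array : List Int) (runs : Int) : Prop := 1 ≤ runs
instance (array : List Int) (runs : Int) : Decidable (Pre_fold_array array runs) := by
  unfold Pre_fold_array; infer_instance
def pvWitness_fold_array : List Int × Int := ([1, 2, 3, 4, 5], 2)

-- On runs ≤ 0 A raises UnboundLocalError; B performs zero folds and returns the array unchanged.
def Raises_fold_array (array : List Int) (runs : Int) : Prop := runs ≤ 0
instance (array : List Int) (runs : Int) : Decidable (Raises_fold_array array runs) := by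
  unfold Raises_fold_array; infer_instance
def pvRaiseWitness_fold_array : List Int × Int := ([3, 7], 0)
def pvRaiseWitnessOut_fold_array : List Int := [3, 7]

def Spec_fold_array (array : List Int) (runs : Int) (out : List Int) : Prop := out = fold_array_alt array runs
instance (array : List Int) (runs : Int) (out : List Int) : Decidable (Spec_fold_array array runs out) := by unfold Spec_fold_array; infer_instance

-- ===== CLAIM (what is proved, stated in full; the proofs are below) =====
def Claim_equal_fold_array : Prop := ∀ (array : List Int) (runs : Int), Dom_fold_array array runs → Pre_fold_array array runs → Spec_fold_array array runs (fold_array array runs)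
def Claim_raises_fold_array : Prop := (∀ (array : List Int) (runs : Int), Dom_fold_array array runs → Raises_fold_array array runs → ¬ Pre_fold_array array runs) ∧ (Dom_fold_array (pvRaiseWitness_fold_array.1) (pvRaiseWitness_fold_array.2) ∧ Raises_fold_array (pvRaiseWitness_fold_array.1) (pvRaiseWitness_fold_array.2) ∧ fold_array_alt (pvRaiseWitness_fold_array.1) (pvRaiseWitness_fold_array.2) = pvRaiseWitnessOut_fold_array)

-- ===== LEMMAS AND PROOFS =====

-- ---- the abstract one-fold step (proof-layer reference object) ----
def pvStep (nums : List Int) : List Int :=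
  (List.range (nums.length / 2)).map
    (fun i => nums.getD i 0 + nums.getD (nums.length - 1 - i) 0) ++
  (if nums.length % 2 = 1 then [nums.getD (nums.length / 2) 0] else [])

def pvStepIter (nums : List Int) : Nat → List Int
  | 0 => nums
  | k + 1 => pvStepIter (pvStep nums) k

-- ---- A's loop is iterated pvStep ----

-- A's inner two-pointer loop, characterised: it appends the pair sums for indices j..n/2-1
theorem pvAInner_spec (nums : List Int) : ∀ (f : Nat) (j : Nat) (acc : List Int),
    j ≤ nums.length / 2 → nums.length / 2 - j ≤ f →
    pvAInner nums f acc (j : Int) ((nums.length : Int) - 1 - j) =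
      acc ++ (List.range' j (nums.length / 2 - j)).map
        (fun (i : Nat) => PySem.List.pyGetD nums (i : Int) 0 +
                  PySem.List.pyGetD nums ((nums.length : Int) - 1 - i) 0) := by
  intro f
  induction f with
  | zero =>
    intro j acc hj hf
    have hj' : j = nums.length / 2 := by omega
    rw [pvAInner, hj']
    simp
  | succ f ih =>
    intro j acc hj hf
    by_cases hlt : j < nums.length / 2
    · rw [pvAInner, if_pos (by omega)]
      have h1 : ((j : Int) + 1) = ((j + 1 : Nat) : Int) := by push_cast; ring
      have h2 : ((nums.length : Int) - 1 - j - 1) = ((nums.length : Int) - 1 - ((j + 1 : Nat) : Int)) := by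
        push_cast; ring
      rw [h1, h2, ih (j + 1) _ (by omega) (by omega)]
      have h3 : nums.length / 2 - j = (nums.length / 2 - (j + 1)) + 1 := by omega
      rw [h3, List.range'_succ]
      simp
    · have hj' : j = nums.length / 2 := by omega
      rw [pvAInner, if_neg (by omega), hj']
      simp

-- one outer iteration of A is pvStep
theorem pvABody_eq_step (nums : List Int) : pvABody nums = pvStep nums := by
  unfold pvABody pvStep
  have h0 := pvAInner_spec nums nums.length 0 [] (by omega) (by omega)
  simp only [Nat.cast_zero, Int.sub_zero, Nat.sub_zero, List.nil_append] at h0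
  have hmap : (List.range' 0 (nums.length / 2)).map
        (fun (i : Nat) => PySem.List.pyGetD nums (i : Int) 0 +
                  PySem.List.pyGetD nums ((nums.length : Int) - 1 - i) 0) =
      (List.range (nums.length / 2)).map
        (fun i => nums.getD i 0 + nums.getD (nums.length - 1 - i) 0) := by
    rw [List.range_eq_range']
    apply List.map_congr_left
    intro i hi
    have hi' : i < nums.length / 2 := by simpa using hi
    have h1 : ((nums.length : Int) - 1 - i) = ((nums.length - 1 - i : Nat) : Int) := by omega
    rw [h1, PySem.List.pyGetD_natCast, PySem.List.pyGetD_natCast]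
  by_cases hp : nums.length % 2 = 1
  · simp only [hp, if_pos, beq_iff_eq, if_true]
    rw [h0, hmap, PySem.List.pyGetD_natCast]
  · have : (nums.length % 2 == 1) = false := by simp [hp]
    simp only [this, Bool.false_eq_true, if_false]
    rw [h0, hmap, if_neg hp, List.append_nil]

-- A's outer loop is k fold steps (k = runs ≥ 1; the fuel runs.toNat is exact)
theorem pvALoop_eq_iter : ∀ (n : Nat) (runs : Int) (nums : List Int),
    runs.toNat = n → 1 ≤ runs → pvALoop n nums runs = pvStepIter nums n := by
  intro n
  induction n with
  | zero => intro runs nums h h1; omega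
  | succ k ih =>
    intro runs nums h h1
    rw [pvALoop, if_pos (by omega : 0 < runs)]
    show (if 0 < runs - 1 then pvALoop k (pvABody nums) (runs - 1) else pvABody nums) = pvStepIter nums (k + 1)
    by_cases hk : 0 < runs - 1
    · rw [if_pos hk, ih (runs - 1) (pvABody nums) (by omega) (by omega), pvABody_eq_step]
      rfl
    · rw [if_neg hk, pvABody_eq_step]
      have hk0 : k = 0 := by omega
      rw [hk0]
      rfl

-- ---- properties of pvStep / pvStepIter ----

theorem pvStep_length (nums : List Int) : (pvStep nums).length = (nums.length + 1) / 2 := by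
  unfold pvStep
  by_cases hp : nums.length % 2 = 1 <;> simp [hp] <;> omega

theorem pvStep_fixed (nums : List Int) (h : nums.length ≤ 1) : pvStep nums = nums := by
  match nums, h with
  | [], _ => rfl
  | [x], _ => simp [pvStep]

theorem pvStepIter_fixed : ∀ (k : Nat) (nums : List Int), nums.length ≤ 1 → pvStepIter nums k = nums := by
  intro k
  induction k with
  | zero => intro nums _; rfl
  | succ k ih =>
    intro nums h
    show pvStepIter (pvStep nums) k = nums
    rw [pvStep_fixed nums h, ih nums h]

theorem pvStepIter_add (a : Nat) : ∀ (b : Nat) (nums : List Int),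
    pvStepIter nums (a + b) = pvStepIter (pvStepIter nums a) b := by
  induction a with
  | zero => intro b nums; rw [Nat.zero_add]; rfl
  | succ a ih =>
    intro b nums
    have h : a + 1 + b = (a + b) + 1 := by omega
    rw [h]
    show pvStepIter (pvStep nums) (a + b) = pvStepIter (pvStepIter (pvStep nums) a) b
    exact ih b (pvStep nums)

theorem pvStepIter_small : ∀ (k : Nat) (nums : List Int),
    nums.length ≤ 2 ^ k → (pvStepIter nums k).length ≤ 1 := by
  intro k
  induction k with
  | zero => intro nums h; simpa using h
  | succ k ih =>
    intro nums h
    show (pvStepIter (pvStep nums) k).length ≤ 1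
    apply ih
    rw [pvStep_length]
    rw [pow_succ] at h
    omega

-- ---- the Nat-level index machinery behind B ----

def pvNatLens : Nat → Nat → List Nat
  | 0, _ => []
  | k + 1, m => m :: pvNatLens k ((m + 1) / 2)

def pvNatFin : Nat → Nat → Nat
  | 0, m => m
  | k + 1, m => pvNatFin k ((m + 1) / 2)

def pvNatDest : Nat → Nat → Nat → Nat
  | 0, _ => fun i => i
  | k + 1, m => fun i => pvNatDest k ((m + 1) / 2) (min i (m - 1 - i))

theorem pvNatDest_lt : ∀ (k m i : Nat), i < m → pvNatDest k m i < pvNatFin k m := by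
  intro k
  induction k with
  | zero => intro m i h; exact h
  | succ k ih =>
    intro m i h
    have h1 := Nat.min_le_left i (m - 1 - i)
    have h2 := Nat.min_le_right i (m - 1 - i)
    exact ih ((m + 1) / 2) (min i (m - 1 - i)) (by omega)

theorem pvBLens_natCast : ∀ (k m : Nat),
    pvBLens k (m : Int) = ((pvNatLens k m).map (fun x => (x : Int)), ((pvNatFin k m : Nat) : Int)) := by
  intro k
  induction k with
  | zero => intro m; rfl
  | succ k ih =>
    intro m
    show (((m : Int)) :: (pvBLens k (PySem.Int.floordiv ((m : Int) + 1) 2)).1,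
          (pvBLens k (PySem.Int.floordiv ((m : Int) + 1) 2)).2) = _
    have h1 : ((m : Int) + 1) = ((m + 1 : Nat) : Int) := by push_cast; ring
    have h2 : PySem.Int.floordiv ((m : Int) + 1) 2 = (((m + 1) / 2 : Nat) : Int) := by
      rw [h1]; exact_mod_cast PySem.Int.floordiv_natCast (m + 1) 2
    rw [h2, ih ((m + 1) / 2)]
    simp [pvNatLens, pvNatFin]

theorem pvDest_foldl_natCast : ∀ (k m i : Nat), i < m →
    ((pvNatLens k m).map (fun x => (x : Int))).foldl (fun j L => min j (L - 1 - j)) (i : Int) =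
      ((pvNatDest k m i : Nat) : Int) := by
  intro k
  induction k with
  | zero => intro m i _; rfl
  | succ k ih =>
    intro m i h
    show ((pvNatLens k ((m + 1) / 2)).map (fun x => (x : Int))).foldl
        (fun j L => min j ((L : Int) - 1 - j)) (min (i : Int) ((m : Int) - 1 - i)) = _
    have h1 : min (i : Int) ((m : Int) - 1 - i) = ((min i (m - 1 - i) : Nat) : Int) := by
      rw [Nat.cast_min]; congr 1; omega
    rw [h1]
    have h2 := Nat.min_le_left i (m - 1 - i)
    exact ih ((m + 1) / 2) (min i (m - 1 - i)) (by omega)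

-- ---- fiber sums ----

def pvFiber (f : Nat → Nat) (nums : List Int) (j : Nat) : Int :=
  ∑ i ∈ (Finset.range nums.length).filter (fun i => f i = j), nums.getD i 0

def pvFS (f : Nat → Nat) (nums : List Int) (m : Nat) : List Int :=
  (List.range m).map (pvFiber f nums)

theorem pvFS_length (f : Nat → Nat) (nums : List Int) (m : Nat) : (pvFS f nums m).length = m := by
  simp [pvFS]

theorem pvFS_id (nums : List Int) : pvFS (fun i => i) nums nums.length = nums := by
  apply List.ext_getElem (by simp [pvFS])
  intro j h1 h2
  have hj : j < nums.length := by simpa [pvFS] using h1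
  simp only [pvFS, List.getElem_map, List.getElem_range, pvFiber]
  rw [Finset.filter_eq' (Finset.range nums.length) j, if_pos (Finset.mem_range.mpr hj)]
  rw [Finset.sum_singleton, List.getD_eq_getElem _ _ hj]

theorem pvStep_eq_FS (nums : List Int) :
    pvStep nums = pvFS (fun i => min i (nums.length - 1 - i)) nums ((nums.length + 1) / 2) := by
  apply List.ext_getElem (by rw [pvStep_length, pvFS_length])
  intro j h1 h2
  have hj : j < (nums.length + 1) / 2 := by rwa [pvFS_length] at h2
  simp only [pvFS, List.getElem_map, List.getElem_range, pvFiber]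
  by_cases hlt : j < nums.length / 2
  · have hset : (Finset.range nums.length).filter (fun i => min i (nums.length - 1 - i) = j) =
        insert j {nums.length - 1 - j} := by
      ext i
      simp only [Finset.mem_filter, Finset.mem_range, Finset.mem_insert, Finset.mem_singleton,
        Nat.min_def]
      constructor
      · rintro ⟨h3, h4⟩; split_ifs at h4 <;> omega
      · intro h3; rcases h3 with h3 | h3 <;> (subst h3; constructor) <;> first
          | omega
          | (split_ifs <;> omega)
    rw [hset, Finset.sum_insert (by simp; omega), Finset.sum_singleton]
    unfold pvStep
    rw [List.getElem_append_left (by simpa using hlt)]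
    simp
  · -- j = nums.length / 2, possible only when the length is odd
    have hodd : nums.length % 2 = 1 := by omega
    have hj' : j = nums.length / 2 := by omega
    have hset : (Finset.range nums.length).filter (fun i => min i (nums.length - 1 - i) = j) =
        {j} := by
      ext i
      simp only [Finset.mem_filter, Finset.mem_range, Finset.mem_singleton, Nat.min_def]
      constructor
      · rintro ⟨h3, h4⟩; split_ifs at h4 <;> omega
      · intro h3; subst h3; constructor
        · omega
        · split_ifs <;> omega
    rw [hset, Finset.sum_singleton]
    unfold pvStep
    rw [List.getElem_append_right (by simp; omega)]
    simp [hodd, hj']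

theorem pvFS_comp (f g : Nat → Nat) (nums : List Int) (m1 m2 : Nat)
    (hf : ∀ i, i < nums.length → f i < m1) :
    pvFS g (pvFS f nums m1) m2 = pvFS (fun i => g (f i)) nums m2 := by
  unfold pvFS
  apply List.map_congr_left
  intro j _
  show pvFiber g ((List.range m1).map (pvFiber f nums)) j = pvFiber (fun i => g (f i)) nums j
  have h1 : pvFiber g ((List.range m1).map (pvFiber f nums)) j =
      ∑ l ∈ (Finset.range m1).filter (fun l => g l = j), pvFiber f nums l := by
    show (∑ i ∈ (Finset.range ((List.range m1).map (pvFiber f nums)).length).filter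
        (fun i => g i = j), ((List.range m1).map (pvFiber f nums)).getD i 0) = _
    rw [List.length_map, List.length_range]
    apply Finset.sum_congr rfl
    intro l hl
    have hl' : l < m1 := Finset.mem_range.mp (Finset.mem_filter.mp hl).1
    rw [List.getD_eq_getElem _ _ (by simpa using hl')]
    simp
  rw [h1]
  unfold pvFiber
  have hmaps : ∀ i ∈ (Finset.range nums.length).filter (fun i => g (f i) = j),
      f i ∈ (Finset.range m1).filter (fun l => g l = j) := by
    intro i hi
    rcases Finset.mem_filter.mp hi with ⟨hi1, hi2⟩
    exact Finset.mem_filter.mpr ⟨Finset.mem_range.mpr (hf i (Finset.mem_range.mp hi1)), hi2⟩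
  have hfib := Finset.sum_fiberwise_of_maps_to hmaps (fun i => nums.getD i 0)
  rw [← hfib]
  apply Finset.sum_congr rfl
  intro l hl
  have hgl : g l = j := (Finset.mem_filter.mp hl).2
  rw [Finset.filter_filter]
  apply Finset.sum_congr _ (fun _ _ => rfl)
  apply Finset.filter_congr
  intro i _
  constructor
  · intro h; exact ⟨by rw [h, hgl], h⟩
  · rintro ⟨_, h⟩; exact h

-- the scatter fibers ARE the iterated fold
theorem pvFS_eq_iter : ∀ (k : Nat) (nums : List Int),
    pvFS (pvNatDest k nums.length) nums (pvNatFin k nums.length) = pvStepIter nums k := by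
  intro k
  induction k with
  | zero => intro nums; exact pvFS_id nums
  | succ k ih =>
    intro nums
    have hstep : pvNatDest (k + 1) nums.length =
        fun i => pvNatDest k ((nums.length + 1) / 2) (min i (nums.length - 1 - i)) := rfl
    rw [hstep]
    show pvFS _ nums (pvNatFin k ((nums.length + 1) / 2)) = pvStepIter (pvStep nums) k
    rw [← pvFS_comp (fun i => min i (nums.length - 1 - i)) (pvNatDest k ((nums.length + 1) / 2))
        nums ((nums.length + 1) / 2) _ (by
          intro i hi
          show min i (nums.length - 1 - i) < (nums.length + 1) / 2
          have h1 := Nat.min_le_left i (nums.length - 1 - i)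
          have h2 := Nat.min_le_right i (nums.length - 1 - i)
          omega)]
    rw [← pvStep_eq_FS]
    have := ih (pvStep nums)
    rw [pvStep_length nums] at this
    exact this

-- ---- the scatter-add buffer loop ----

theorem pvMap_getD_range (l : List Int) : (List.range l.length).map (fun j => l.getD j 0) = l := by
  apply List.ext_getElem (by simp)
  intro j h1 h2
  simp only [List.getElem_map, List.getElem_range]
  rw [List.getD_eq_getElem _ _ (by simpa using h2)]

theorem pvScatter_spec (d : Int × Int → Nat) : ∀ (l : List (Int × Int)) (buf : List Int),
    (∀ p ∈ l, d p < buf.length) →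
    l.foldl (fun out p => out.set (d p) (out.getD (d p) 0 + p.2)) buf =
      (List.range buf.length).map
        (fun j => buf.getD j 0 + ((l.filter (fun p => d p = j)).map Prod.snd).sum) := by
  intro l
  induction l with
  | nil =>
    intro buf _
    simp only [List.foldl_nil, List.filter_nil, List.map_nil, List.sum_nil, add_zero]
    exact (pvMap_getD_range buf).symm
  | cons p rest ih =>
    intro buf hb
    have hp : d p < buf.length := hb p (List.mem_cons_self)
    simp only [List.foldl_cons]
    rw [ih _ (by intro q hq; rw [List.length_set]; exact hb q (List.mem_cons_of_mem _ hq))]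
    rw [List.length_set]
    apply List.ext_getElem (by simp)
    intro j h1 h2
    have hj : j < buf.length := by simpa using h1
    simp only [List.getElem_map, List.getElem_range, List.filter_cons]
    by_cases hdp : d p = j
    · simp only [hdp, decide_true, if_pos, List.map_cons, List.sum_cons]
      rw [List.getD_eq_getElem _ _ (by simpa using hj), List.getElem_set_self,
        List.getD_eq_getElem _ _ hj]
      subst hdp
      ring
    · have : (decide (d p = j)) = false := by simp [hdp]
      simp only [this, Bool.false_eq_true, if_false]
      rw [List.getD_eq_getElem _ _ (by simpa using hj), List.getElem_set_ne (by omega),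
        List.getD_eq_getElem _ _ hj]

-- list-level filtered sum over enumerate = Finset fiber sum
theorem pvEnum_fiber (f : Nat → Nat) (j : Nat) : ∀ (array : List Int),
    (((PySem.List.enumerate array 0).filter (fun p => f p.1.toNat = j)).map Prod.snd).sum =
      pvFiber f array j := by
  intro array
  induction array using List.reverseRecOn with
  | nil => simp [PySem.List.enumerate_nil, pvFiber]
  | append_singleton xs x ih =>
    rw [PySem.List.enumerate_append]
    simp only [List.filter_append, List.map_append, List.sum_append, ih]
    unfold pvFiber
    rw [List.length_append, List.length_singleton, Finset.range_add_one, Finset.filter_insert]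
    have hx : ∀ i ∈ (Finset.range xs.length).filter (fun i => f i = j),
        (xs ++ [x]).getD i 0 = xs.getD i 0 := by
      intro i hi
      have hi' : i < xs.length := Finset.mem_range.mp (Finset.mem_filter.mp hi).1
      rw [List.getD_eq_getElem _ _ (by simp; omega), List.getD_eq_getElem _ _ hi',
        List.getElem_append_left hi']
    have hsum : ∀ (s : Finset ℕ), (∀ i ∈ s, i < xs.length) →
        ∑ i ∈ s, (xs ++ [x]).getD i 0 = ∑ i ∈ s, xs.getD i 0 := by
      intro s hs
      apply Finset.sum_congr rfl
      intro i hi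
      have hi' := hs i hi
      rw [List.getD_eq_getElem _ _ (by simp; omega), List.getD_eq_getElem _ _ hi',
        List.getElem_append_left hi']
    have hlast : (xs ++ [x]).getD xs.length 0 = x := by
      rw [List.getD_eq_getElem _ _ (by simp), List.getElem_append_right (le_refl _)]
      simp
    have henum : PySem.List.enumerate [x] (0 + (xs.length : Int)) =
        [((xs.length : Int), x)] := by
      simp [PySem.List.enumerate_cons, PySem.List.enumerate_nil]
    rw [henum]
    by_cases hf : f xs.length = j
    · have : ((xs.length : Int)).toNat = xs.length := by omega
      simp only [List.filter_cons, this, hf, decide_true, if_pos, List.filter_nil,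
        List.map_cons, List.map_nil, List.sum_cons, List.sum_nil, add_zero]
      rw [Finset.sum_insert (by simp), hlast,
        hsum _ (fun i hi => Finset.mem_range.mp (Finset.mem_filter.mp hi).1)]
      ring
    · have : ((xs.length : Int)).toNat = xs.length := by omega
      simp only [List.filter_cons, this]
      have hdec : (decide (f xs.length = j)) = false := by simp [hf]
      simp only [hdec, Bool.false_eq_true, if_false, List.filter_nil, List.map_nil,
        List.sum_nil, add_zero]
      rw [if_neg hf, hsum _ (fun i hi => Finset.mem_range.mp (Finset.mem_filter.mp hi).1)]


-- B's port computes pvStepIter for min(runs, cap) steps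
theorem pvScatterAll (array : List Int) (K : Nat) :
    (PySem.List.enumerate array 0).foldl
      (fun out p =>
        PySem.List.pySetD out
          (((pvNatLens K array.length).map (fun x => (x : Int))).foldl
            (fun j L => min j (L - 1 - j)) p.1)
          (PySem.List.pyGetD out
            (((pvNatLens K array.length).map (fun x => (x : Int))).foldl
              (fun j L => min j (L - 1 - j)) p.1) 0 + p.2))
      (List.replicate (pvNatFin K array.length) 0) = pvStepIter array K := by
  refine Eq.trans (PySem.List.foldl_congr_mem' _ _
      (fun out (p : Int × Int) =>
        out.set (pvNatDest K array.length p.1.toNat)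
          (out.getD (pvNatDest K array.length p.1.toNat) 0 + p.2)) _ ?_) ?_
  · intro p hp acc
    rcases (PySem.List.mem_enumerate_iff _ _ _).mp hp with ⟨i, hi, rfl⟩
    simp only [zero_add, Int.toNat_natCast]
    rw [pvDest_foldl_natCast K array.length i hi]
    rw [PySem.List.pySetD_natCast, PySem.List.pyGetD_natCast]
  · rw [pvScatter_spec _ _ _ (by
        intro p hp
        rcases (PySem.List.mem_enumerate_iff _ _ _).mp hp with ⟨i, hi, rfl⟩
        rw [List.length_replicate]
        simp only [zero_add, Int.toNat_natCast]
        exact pvNatDest_lt K array.length i hi)]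
    rw [List.length_replicate]
    rw [← pvFS_eq_iter K array]
    unfold pvFS
    apply List.map_congr_left
    intro j hj
    have hj' : j < pvNatFin K array.length := List.mem_range.mp hj
    rw [List.getD_eq_getElem _ _ (by simpa using hj'), List.getElem_replicate,
      ← pvEnum_fiber (pvNatDest K array.length) j array]
    simp

theorem pvAlt_eq_iter (array : List Int) (runs : Int) :
    fold_array_alt array runs =
      pvStepIter array (min runs (max 1 (PySem.Int.bitLength ((array.length : Int) - 1) : Int))).toNat := by
  unfold fold_array_alt
  simp only [pvBLens_natCast, Int.toNat_natCast]
  exact pvScatterAll array _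

-- ===== VERDICT (by name: the statement is the Claim_ definition above) =====
theorem fold_array_spec : Claim_equal_fold_array := by
  intro array runs _hdom hpre
  unfold Spec_fold_array fold_array
  have hpre' : 1 ≤ runs := hpre
  rw [pvALoop_eq_iter runs.toNat runs array rfl hpre', pvAlt_eq_iter]
  set cap : Int := max 1 (PySem.Int.bitLength ((array.length : Int) - 1) : Int) with hcapdef
  have hcap1 : (1 : Int) ≤ cap := le_max_left _ _
  by_cases hle : runs ≤ cap
  · rw [min_eq_left hle]
  · have hle' : cap < runs := lt_of_not_ge hle
    rw [min_eq_right (le_of_lt hle')]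
    have hsplit : runs.toNat = cap.toNat + (runs.toNat - cap.toNat) := by omega
    rw [hsplit, pvStepIter_add]
    apply pvStepIter_fixed
    apply pvStepIter_small
    have hb := PySem.Int.lt_two_pow_bitLength ((array.length : Int) - 1)
    have hc : PySem.Int.bitLength ((array.length : Int) - 1) ≤ cap.toNat := by
      have h2 : ((PySem.Int.bitLength ((array.length : Int) - 1) : Nat) : Int) ≤ cap :=
        le_max_right _ _
      omega
    rcases Nat.eq_zero_or_pos array.length with h0 | h0
    · rw [h0]; exact Nat.zero_le _
    · have hnn : ((array.length : Int) - 1).natAbs = array.length - 1 := by omega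
      rw [hnn] at hb
      calc array.length ≤ 2 ^ PySem.Int.bitLength ((array.length : Int) - 1) := by omega
        _ ≤ 2 ^ cap.toNat := Nat.pow_le_pow_right (by norm_num) hc

@[simp] theorem fold_array_raises : Claim_raises_fold_array := by
  unfold Claim_raises_fold_array
  exact ⟨fun _ _ _ h => by unfold Raises_fold_array at h; unfold Pre_fold_array; omega, by decide⟩
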